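-- pv_equiv track=rewrite | github.com/gentleibkay/x-automation | moderation.py | passes_checks
-- ===== SOURCE A (Python) =====
-- BADWORDS = {
--     "fuck", "shit", "bitch", "nigga", "nigger",
--     "rape", "kill", "terrorist", "isis"
-- }
--
-- def passes_checks(text: str) -> bool:
--     """Simple text moderation filter."""
--     if not text:
--         return False
--
--     t = text.lower()
--
--     # block profanity
--     for bad in BADWORDS:
--         if bad in t:
--             return False
--
--     # block extremely long texts
--     if len(text) > 300:
--         return False
--
--     return True
-- ===== SOURCE B (Python) =====
-- BADWORDS = {
--     "fuck", "shit", "bitch", "nigga", "nigger",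
--     "rape", "kill", "terrorist", "isis"
-- }
--
-- _WORDS = tuple(sorted(BADWORDS))
--
--
-- def passes_checks(text: str) -> bool:
--     """Simple text moderation filter (single positional scan)."""
--     if not text or len(text) > 300:
--         return False
--     t = text.lower()
--     return all(not any(t.startswith(w, i) for w in _WORDS)
--                for i in range(len(t)))
-- ===== Notes on version B (the rewrite author's own statement) =====
-- stated objective: alternative
-- what changed: B merges the empty/length guards into one up-front check and replaces the word-major loop of per-word substring searches by a single position-major scan that tests at every index whether any bad word starts there.
import Mathlib
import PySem

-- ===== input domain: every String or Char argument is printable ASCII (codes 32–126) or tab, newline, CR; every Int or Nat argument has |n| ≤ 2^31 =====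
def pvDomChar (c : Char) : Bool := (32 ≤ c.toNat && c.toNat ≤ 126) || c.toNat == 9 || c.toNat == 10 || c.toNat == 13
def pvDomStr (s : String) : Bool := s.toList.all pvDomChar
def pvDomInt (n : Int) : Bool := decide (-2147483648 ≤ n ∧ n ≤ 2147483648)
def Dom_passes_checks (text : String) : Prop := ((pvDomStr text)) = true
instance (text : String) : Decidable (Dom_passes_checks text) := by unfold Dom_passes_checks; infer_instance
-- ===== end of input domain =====

-- B replaces A's word-major loop of substring searches by one position-major scan
-- testing at each index whether any bad word starts there (objective: alternative).

-- ===== PORT A =====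
-- BADWORDS, in source order (the set's iteration order does not affect the result)
def pvBadwordsA : List String :=
  ["fuck", "shit", "bitch", "nigga", "nigger", "rape", "kill", "terrorist", "isis"]

-- the 'for bad in BADWORDS: if bad in t: return False' loop (true = fell through)
def pvCheckWords : List String → String → Bool
  | [], _ => true
  | bad :: rest, t => if PySem.Str.isIn bad t then false else pvCheckWords rest t

def passes_checks (text : String) : Bool :=
  if PySem.Str.len text == 0 then false
  else
    if pvCheckWords pvBadwordsA (PySem.Str.lower text) then
      if PySem.Str.len text > 300 then false else true
    else false

-- ===== PORT B =====
-- sorted(BADWORDS)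
def pvBadwordsB : List String :=
  ["bitch", "fuck", "isis", "kill", "nigga", "nigger", "rape", "shit", "terrorist"]

-- all(not any(t.startswith(w, i) for w in _WORDS) for i in range(len(t))):
-- scan over the positions of t, i.e. over its successive suffixes
def pvNoBadAt (words : List String) : List Char → Bool
  | [] => true
  | c :: rest =>
      !(words.any fun w => w.toList.isPrefixOf (c :: rest)) && pvNoBadAt words rest

def passes_checks_alt (text : String) : Bool :=
  if PySem.Str.len text == 0 || PySem.Str.len text > 300 then false
  else pvNoBadAt pvBadwordsB (PySem.Str.lower text).toList

-- ===== PRECONDITION & SPEC =====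
def Spec_passes_checks (text : String) (out : Bool) : Prop := out = passes_checks_alt text
instance (text : String) (out : Bool) : Decidable (Spec_passes_checks text out) := by unfold Spec_passes_checks; infer_instance

-- ===== CLAIM (what is proved, stated in full; the proofs are below) =====
def Claim_equal_passes_checks : Prop := ∀ (text : String), Dom_passes_checks text → Spec_passes_checks text (passes_checks text)

-- ===== LEMMAS AND PROOFS =====

-- A's loop returns true iff no word of the list is a substring
lemma pvCheckWords_iff (words : List String) (t : String) :
    pvCheckWords words t = true ↔ ∀ w ∈ words, ¬ PySem.Str.isIn w t = true := by
  induction words with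
  | nil => simp [pvCheckWords]
  | cons w rest ih =>
      by_cases h : PySem.Str.isIn w t = true <;>
        simp [pvCheckWords, ih]

-- B's positional scan returns true iff no (nonempty) word is an infix
lemma pvNoBadAt_iff (words : List String) (hw : ∀ w ∈ words, w.toList ≠ [])
    (cs : List Char) :
    pvNoBadAt words cs = true ↔ ∀ w ∈ words, ¬ w.toList <:+: cs := by
  induction cs with
  | nil =>
      simp only [pvNoBadAt, true_iff]
      intro w hmem hinf
      exact hw w hmem (List.eq_nil_of_infix_nil hinf)
  | cons c rest ih =>
      simp only [pvNoBadAt, Bool.and_eq_true, Bool.not_eq_true', List.any_eq_false, ih]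
      constructor
      · rintro ⟨hnp, hns⟩ w hmem hinf
        rcases List.infix_cons_iff.1 hinf with hpre | hsuf
        · exact absurd ((List.isPrefixOf_iff_prefix).2 hpre) (by simpa using hnp w hmem)
        · exact hns w hmem hsuf
      · intro h
        refine ⟨fun w hmem => ?_, fun w hmem hsuf => ?_⟩
        · simp only [Bool.not_eq_true] at *
          by_contra hp
          simp only [Bool.not_eq_false] at hp
          exact h w hmem (List.infix_cons_iff.2
            (Or.inl ((List.isPrefixOf_iff_prefix).1 hp)))
        · exact h w hmem (List.infix_cons_iff.2 (Or.inr hsuf))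

-- ===== VERDICT (by name: the statement is the Claim_ definition above) =====
theorem passes_checks_spec : Claim_equal_passes_checks := by
  intro text _
  unfold Spec_passes_checks passes_checks passes_checks_alt
  have hwB : ∀ w ∈ pvBadwordsB, w.toList ≠ [] := by decide
  have hmem : ∀ w : String, w ∈ pvBadwordsA ↔ w ∈ pvBadwordsB := by
    intro w; simp [pvBadwordsA, pvBadwordsB]; tauto
  have hkey : pvCheckWords pvBadwordsA (PySem.Str.lower text) =
      pvNoBadAt pvBadwordsB (PySem.Str.lower text).toList := by
    rw [Bool.eq_iff_iff, pvCheckWords_iff, pvNoBadAt_iff pvBadwordsB hwB]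
    constructor
    · intro h w hmemB hinf
      exact h w ((hmem w).2 hmemB) ((PySem.Str.isIn_iff_infix _ _).2 hinf)
    · intro h w hmemA hIsIn
      exact h w ((hmem w).1 hmemA) ((PySem.Str.isIn_iff_infix _ _).1 hIsIn)
  rw [hkey]
  split_ifs <;> simp_all <;> omega
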